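-- pv_equiv track=rewrite | github.com/vmpires/Python | 87) XPronounce+Warehouse separation.py | xPronounce
-- ===== SOURCE A (Python) =====
-- def xPronounce(string):
--     lista = string.split()
--     for index in range(len(lista)):
--         if len(lista[index]) == 1 and lista[index] == "x":
--             lista[index] = "ecks"
--         if lista[index][0] == "x":
--             lista[index] = lista[index].replace("x","z")
--     newstring = " ".join(lista)
--     for letter in newstring:
--         if letter == "x":
--             newstring = newstring.replace("x","cks")
--     return newstring
-- ===== SOURCE B (Python) =====
-- def xPronounce(string):
--     def say(w):
--         if w == "x":
--             return "ecks"
--         if w.startswith("x"):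
--             return w.replace("x", "z")
--         return w.replace("x", "cks")
--     return " ".join(say(w) for w in string.split())
-- ===== Notes on version B (the rewrite author's own statement) =====
-- stated objective: simpler
-- what changed: Each word is transformed completely by one pure helper in a single pass (the bare letter becomes ecks, a word starting with it maps it to z, any other word maps it to cks) and the results are joined directly, removing A's mutating index loop and its trailing whole-string character scan that re-runs a global replace for every occurrence seen.
import Mathlib
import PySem

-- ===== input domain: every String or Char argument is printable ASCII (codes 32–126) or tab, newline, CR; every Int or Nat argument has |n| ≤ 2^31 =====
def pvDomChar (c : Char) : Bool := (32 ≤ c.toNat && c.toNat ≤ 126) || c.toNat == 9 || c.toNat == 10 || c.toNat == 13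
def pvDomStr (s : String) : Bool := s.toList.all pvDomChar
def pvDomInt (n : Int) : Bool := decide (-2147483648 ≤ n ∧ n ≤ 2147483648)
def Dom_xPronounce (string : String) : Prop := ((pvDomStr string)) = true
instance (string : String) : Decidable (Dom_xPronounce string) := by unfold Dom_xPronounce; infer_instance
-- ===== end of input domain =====

-- B transforms each word fully inside one pass (x->ecks, leading-x->z, else x->cks) and joins,
-- dropping A's mutating index loop and the trailing whole-string scan-and-replace pass; same values, simpler.


-- ===== PORT A =====
-- the body of A's first loop: lista[index] = … applied to the element at each index
-- (words produced by split() are nonempty, so Python's lista[index][0] never raises; the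
--  pyGet? comparison below is `some 'x'` exactly when the word starts with 'x')
def xPronounceWordA (w : String) : String :=
  let w := if PySem.Str.len w == 1 && w == "x" then "ecks" else w
  if PySem.Str.pyGet? w 0 == some 'x' then PySem.Str.replace w "x" "z" else w

def xPronounce (string : String) : String :=
  let lista := PySem.Str.split₀ string
  let lista := lista.map xPronounceWordA
  let newstring := PySem.Str.join " " lista
  -- for letter in newstring: iterates over the string as it was when the loop started
  newstring.toList.foldl
    (fun ns letter => if letter == 'x' then PySem.Str.replace ns "x" "cks" else ns) newstring

-- ===== PORT B =====
def xPronounceSay (w : String) : String :=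
  if w == "x" then "ecks"
  else if PySem.Str.startswith w "x" then PySem.Str.replace w "x" "z"
  else PySem.Str.replace w "x" "cks"

def xPronounce_alt (string : String) : String :=
  PySem.Str.join " " ((PySem.Str.split₀ string).map xPronounceSay)

-- ===== PRECONDITION & SPEC =====
def Spec_xPronounce (string : String) (out : String) : Prop := out = xPronounce_alt string
instance (string : String) (out : String) : Decidable (Spec_xPronounce string out) := by unfold Spec_xPronounce; infer_instance

-- ===== CLAIM (what is proved, stated in full; the proofs are below) =====
def Claim_equal_xPronounce : Prop := ∀ (string : String), Dom_xPronounce string → Spec_xPronounce string (xPronounce string)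

-- ===== LEMMAS AND PROOFS =====

-- replace with a single-character pattern is a flatMap over the characters
theorem replace_go_single (o : Char) (new : List Char) :
    ∀ (l : List Char) (fuel : Nat) (acc : List Char), l.length ≤ fuel →
      PySem.Chars.replace.go [o] new fuel l acc
        = acc.reverse ++ l.flatMap (fun c => if c = o then new else [c]) := by
  intro l
  induction l with
  | nil => intro fuel acc _; cases fuel <;> simp [PySem.Chars.replace.go]
  | cons c t ih =>
      intro fuel acc hf
      cases fuel with
      | zero => simp at hf
      | succ fuel =>
          simp only [PySem.Chars.replace.go]
          by_cases hco : c = o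
          · subst hco
            have hpre : [c].isPrefixOf (c :: t) = true := by simp [List.isPrefixOf]
            rw [if_pos hpre]
            have hd : List.drop ([c].length) (c :: t) = t := by simp
            rw [hd, ih fuel (new.reverse ++ acc) (by simp at hf; omega)]
            simp [List.flatMap_cons]
          · have hpre : [o].isPrefixOf (c :: t) = false := by
              simp [List.isPrefixOf]; exact fun h => hco h.symm
            rw [if_neg (by simp [hpre])]
            rw [ih fuel (c :: acc) (by simpa using Nat.le_of_succ_le_succ hf)]
            simp [List.flatMap_cons, hco]

theorem replace_single (o : Char) (new s : List Char) :
    PySem.Chars.replace s [o] new = s.flatMap (fun c => if c = o then new else [c]) := by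
  simp only [PySem.Chars.replace, List.isEmpty_cons, Bool.false_eq_true, if_false]
  simpa using replace_go_single o new s s.length [] (le_refl _)

theorem replace_of_not_mem (o : Char) (new s : List Char) (h : o ∉ s) :
    PySem.Chars.replace s [o] new = s := by
  rw [replace_single]
  induction s with
  | nil => rfl
  | cons c t ih =>
      simp only [List.mem_cons, not_or] at h
      simp [List.flatMap_cons, Ne.symm h.1, ih h.2]

theorem not_mem_replace (o : Char) (new s : List Char) (h : o ∉ new) :
    o ∉ PySem.Chars.replace s [o] new := by
  rw [replace_single]
  intro hm
  rcases List.mem_flatMap.mp hm with ⟨c, _, hc⟩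
  by_cases hco : c = o
  · simp [hco] at hc; exact h hc
  · simp [hco] at hc; exact hco (hc ▸ rfl)

theorem toList_x : ("x" : String).toList = ['x'] := rfl

theorem str_replace_no_x (s : String) (h : 'x' ∉ s.toList) :
    PySem.Str.replace s "x" "cks" = s := by
  apply String.ext
  rw [PySem.Str.toList_replace, toList_x]
  exact replace_of_not_mem 'x' _ _ h

theorem no_x_str_replace (s : String) : 'x' ∉ (PySem.Str.replace s "x" "cks").toList := by
  rw [PySem.Str.toList_replace, toList_x]
  exact not_mem_replace 'x' _ _ (by decide)

-- A's trailing character loop is a single global replace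
theorem foldl_scan_replace (l : List Char) (acc : String) :
    l.foldl (fun ns letter => if letter == 'x' then PySem.Str.replace ns "x" "cks" else ns) acc
      = if l.any (· == 'x') then PySem.Str.replace acc "x" "cks" else acc := by
  induction l generalizing acc with
  | nil => simp
  | cons c t ih =>
      rw [List.foldl_cons, ih]
      by_cases hc : c = 'x'
      · subst hc
        simp only [beq_self_eq_true, List.any_cons, Bool.true_or]
        split_ifs with ht
        · exact str_replace_no_x _ (no_x_str_replace acc)
        · rfl
      · have hcb : (c == 'x') = false := by simpa using hc
        simp [hcb]

-- split() produces only nonempty words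
theorem split₀_go_ne_nil :
    ∀ (s cur : List Char) (acc : List (List Char)),
      (∀ w ∈ acc, w ≠ []) → ∀ w ∈ PySem.Chars.split₀.go s cur acc, w ≠ [] := by
  intro s
  induction s with
  | nil =>
      intro cur acc hacc w hw
      simp only [PySem.Chars.split₀.go] at hw
      split at hw
      · exact hacc w (by simpa using hw)
      · rename_i hcur
        simp only [List.reverse_cons, List.mem_append, List.mem_reverse, List.mem_singleton] at hw
        rcases hw with hw | hw
        · exact hacc w hw
        · subst hw; simpa [List.isEmpty_iff] using hcur
  | cons c rest ih =>
      intro cur acc hacc w hw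
      simp only [PySem.Chars.split₀.go] at hw
      split at hw
      · split at hw
        · exact ih [] acc hacc w hw
        · rename_i hcur
          refine ih [] (cur.reverse :: acc) ?_ w hw
          intro v hv
          rcases List.mem_cons.mp hv with hv | hv
          · subst hv; simpa [List.isEmpty_iff] using hcur
          · exact hacc v hv
      · exact ih (c :: cur) acc hacc w hw

theorem split₀_ne_nil (s : List Char) : ∀ w ∈ PySem.Chars.split₀ s, w ≠ [] := by
  intro w hw
  exact split₀_go_ne_nil s [] [] (by simp) w hw

theorem intercalate_cons₂ (sep w v : List Char) (r : List (List Char)) :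
    List.intercalate sep (w :: v :: r) = w ++ sep ++ List.intercalate sep (v :: r) := by
  simp [List.intercalate, List.intersperse_cons₂]

-- a character of a joined word is a character of the join
theorem mem_of_mem_join (sep : List Char) (parts : List (List Char)) (w : List Char)
    (hw : w ∈ parts) (c : Char) (hc : c ∈ w) : c ∈ PySem.Chars.join sep parts := by
  simp only [PySem.Chars.join]
  induction parts with
  | nil => cases hw
  | cons v t ih =>
      cases t with
      | nil =>
          simp only [List.mem_singleton] at hw
          subst hw
          simpa [List.intercalate] using hc
      | cons u r =>
          rw [intercalate_cons₂]
          rcases List.mem_cons.mp hw with hw | hw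
          · subst hw; simp [hc]
          · simp [ih hw]

-- replace distributes over join with a pattern-free separator
theorem replace_join (parts : List (List Char)) (new : List Char) :
    PySem.Chars.replace (PySem.Chars.join [' '] parts) ['x'] new
      = PySem.Chars.join [' '] (parts.map (fun w => PySem.Chars.replace w ['x'] new)) := by
  simp only [PySem.Chars.join, replace_single]
  induction parts with
  | nil => rfl
  | cons w t ih =>
      cases t with
      | nil => simp [List.intercalate]
      | cons v u =>
          simp [intercalate_cons₂, List.flatMap_append, ih]

-- the per-word agreement: global-replacing A's word result gives B's word result
theorem word_agree (w : String) (hw : w.toList ≠ []) :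
    PySem.Str.replace (xPronounceWordA w) "x" "cks" = xPronounceSay w := by
  obtain ⟨c, t, hct⟩ : ∃ c t, w.toList = c :: t := by
    cases h : w.toList with
    | nil => exact absurd h hw
    | cons c t => exact ⟨c, t, rfl⟩
  by_cases hx : w = "x"
  · subst hx
    decide
  · have hlen : (PySem.Str.len w == 1 && w == "x") = false := by
      simp [hx]
    have hget0 : PySem.Str.pyGet? w (0 : Int) = w.toList[(0 : Nat)]? := by
      exact_mod_cast PySem.Str.pyGet?_natCast w (0 : Nat)
    by_cases hc : c = 'x'
    · -- leading 'x', not the word "x": A replaces x→z, the global pass finds no 'x' left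
      have hget : (PySem.Str.pyGet? w 0 == some 'x') = true := by
        simp [hct, hc]
      have hsw : PySem.Str.startswith w "x" = true := by
        simp [PySem.Str.startswith, PySem.Chars.startswith, hct, hc, List.isPrefixOf]
      unfold xPronounceWordA xPronounceSay
      simp only [hlen, Bool.false_eq_true, if_false]
      rw [if_pos hget, if_neg (show ¬((w == "x") = true) by simp [hx]), if_pos hsw]
      apply str_replace_no_x
      rw [PySem.Str.toList_replace, toList_x]
      exact not_mem_replace 'x' _ _ (by decide)
    · -- no leading 'x': A leaves the word alone, the global pass does x→cks
      have hget : (PySem.Str.pyGet? w 0 == some 'x') = false := by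
        simp [hct, hc]
      have hsw : PySem.Str.startswith w "x" = false := by
        simp only [PySem.Str.startswith, PySem.Chars.startswith, hct, toList_x]
        simp [List.isPrefixOf]
        exact fun h => hc h.symm
      unfold xPronounceWordA xPronounceSay
      simp only [hlen, Bool.false_eq_true, if_false]
      rw [if_neg (show ¬((PySem.Str.pyGet? w 0 == some 'x') = true) by simp [hct, hc]),
        if_neg (show ¬((w == "x") = true) by simp [hx]),
        if_neg (show ¬(PySem.Str.startswith w "x" = true) by
          simp [PySem.Chars.startswith, hct, List.isPrefixOf]
          exact fun h => hc h.symm)]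

-- ===== VERDICT (by name: the statement is the Claim_ definition above) =====
theorem xPronounce_spec : Claim_equal_xPronounce := by
  intro s _
  unfold Spec_xPronounce xPronounce xPronounce_alt
  rw [foldl_scan_replace]
  have hsep : (" " : String).toList = [' '] := rfl
  have hwords : ∀ w ∈ PySem.Str.split₀ s, w.toList ≠ [] := by
    intro w hw h
    have hw' : w.toList ∈ PySem.Chars.split₀ s.toList := by
      rw [← PySem.Str.split₀_map_toList]
      exact List.mem_map_of_mem hw
    exact split₀_ne_nil s.toList w.toList hw' h
  split_ifs with hany
  · -- some 'x' survives A's first loop: the global replace acts word by word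
    apply String.ext
    rw [PySem.Str.toList_replace, PySem.Str.toList_join, PySem.Str.toList_join, toList_x]
    rw [hsep, List.map_map, replace_join, List.map_map, List.map_map]
    refine congrArg (PySem.Chars.join [' ']) ?_
    apply List.map_congr_left
    intro w hw
    simp only [Function.comp]
    rw [← word_agree w (hwords w hw), PySem.Str.toList_replace, toList_x]
  · -- no 'x' in the joined string: each per-word replace is the identity there
    apply String.ext
    rw [PySem.Str.toList_join, PySem.Str.toList_join, hsep, List.map_map, List.map_map]
    have hnx : 'x' ∉ PySem.Chars.join [' ']
        (List.map (String.toList ∘ xPronounceWordA) (PySem.Str.split₀ s)) := by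
      intro hm
      apply hany
      rw [PySem.Str.toList_join, hsep, List.map_map]
      exact List.any_eq_true.mpr ⟨'x', hm, by simp⟩
    refine congrArg (PySem.Chars.join [' ']) ?_
    apply List.map_congr_left
    intro w hw
    simp only [Function.comp]
    have hxin : 'x' ∉ (xPronounceWordA w).toList := fun hm =>
      hnx (mem_of_mem_join [' '] _ (xPronounceWordA w).toList
        (List.mem_map_of_mem (f := String.toList ∘ xPronounceWordA) hw) 'x' hm)
    rw [← word_agree w (hwords w hw), PySem.Str.toList_replace, toList_x,
      replace_of_not_mem 'x' _ _ hxin]
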